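-- pv_equiv track=rewrite | github.com/alexpaden/hexmas | day3.py | process_letters
-- ===== SOURCE A (Python) =====
-- def process_letters(modulus, current_magic_number, letters):
--     """
--     Process each letter with its pair of magic numbers to generate a security number and update the magic number.
--
--     :param modulus: The modulus for the computations.
--     :param current_magic_number: The starting magic number.
--     :param letters: A list of tuples, each containing two magic numbers (A, B) for each letter.
--     :return: A list of tuples in the format [Security Number, Next Magic Number].
--     """
--     output = []
--     for a, b in letters:
--         # Calculate the security number for the current letter
--         security_number = (a * current_magic_number) % modulus
--
--         # Calculate the next magic number
--         next_magic_number = (b * current_magic_number) % modulus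
--
--         # Update the current magic number for the next iteration
--         current_magic_number = next_magic_number
--
--         # Add the results to the output list
--         output.append([security_number, next_magic_number])
--
--     return output
-- ===== SOURCE B (Python) =====
-- def process_letters(modulus, current_magic_number, letters):
--     # Pass 1: build the chain of magic numbers and the "previous" magic
--     # used at each position (the starting value, then each computed magic).
--     prevs = []
--     magics = []
--     cmn = current_magic_number
--     for _, b in letters:
--         prevs.append(cmn)
--         magic = (b * cmn) % modulus
--         magics.append(magic)
--         cmn = magic
--     # Pass 2: compute each security number from the prefix table and pair it
--     # with the already-computed magic number.
--     return [[(a * p) % modulus, m]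
--             for (a, _), p, m in zip(letters, prevs, magics)]
-- ===== Notes on version B (the rewrite author's own statement) =====
-- stated objective: alternative
-- what changed: A fuses everything in one loop with a running magic number; B first builds the whole magic-number chain plus a table of previous values in one pass, then a separate comprehension computes each security number from that table and pairs it with the precomputed magic.
import Mathlib
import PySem

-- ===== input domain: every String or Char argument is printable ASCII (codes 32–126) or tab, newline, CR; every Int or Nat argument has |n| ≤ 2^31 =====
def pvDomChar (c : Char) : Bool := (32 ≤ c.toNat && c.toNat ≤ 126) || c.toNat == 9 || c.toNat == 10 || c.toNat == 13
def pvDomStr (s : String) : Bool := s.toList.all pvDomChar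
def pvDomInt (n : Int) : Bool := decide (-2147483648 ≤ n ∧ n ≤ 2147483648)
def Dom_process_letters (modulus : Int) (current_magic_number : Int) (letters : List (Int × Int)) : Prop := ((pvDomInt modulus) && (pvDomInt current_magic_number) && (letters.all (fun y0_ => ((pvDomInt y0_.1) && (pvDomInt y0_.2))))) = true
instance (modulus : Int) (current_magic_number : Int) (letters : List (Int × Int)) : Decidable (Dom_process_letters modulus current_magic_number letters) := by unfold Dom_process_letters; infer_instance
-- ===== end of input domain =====

-- B replaces A's single fused loop by a two-pass scheme: build the magic-number
-- chain and a table of previous values first, then compute security numbers in a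
-- separate pass (objective: alternative decomposition, same cost).


-- ===== PORT A =====
-- A: one fused loop; state (current_magic_number, output).
def process_letters (modulus : Int) (current_magic_number : Int) (letters : List (Int × Int)) : List (List Int) :=
  (letters.foldl
    (fun (st : Int × List (List Int)) ab =>
      let security_number := PySem.Int.mod (ab.1 * st.1) modulus
      let next_magic_number := PySem.Int.mod (ab.2 * st.1) modulus
      (next_magic_number, st.2 ++ [[security_number, next_magic_number]]))
    (current_magic_number, [])).2

-- ===== PORT B =====
-- B pass 1: fold building (cmn, prevs, magics).
def process_letters_alt (modulus : Int) (current_magic_number : Int) (letters : List (Int × Int)) : List (List Int) :=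
  let st := letters.foldl
    (fun (st : Int × List Int × List Int) ab =>
      let magic := PySem.Int.mod (ab.2 * st.1) modulus
      (magic, st.2.1 ++ [st.1], st.2.2 ++ [magic]))
    (current_magic_number, [], [])
  -- pass 2: zip letters with the prefix table and the magic list.
  (letters.zip (st.2.1.zip st.2.2)).map
    (fun x => [PySem.Int.mod (x.1.1 * x.2.1) modulus, x.2.2])

-- ===== PRECONDITION & SPEC =====
-- Pre_ excludes only modulus = 0 with nonempty letters, where both Pythons raise ZeroDivisionError.
def Pre_process_letters (modulus : Int) (current_magic_number : Int) (letters : List (Int × Int)) : Prop :=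
  letters = [] ∨ modulus ≠ 0
instance (modulus : Int) (current_magic_number : Int) (letters : List (Int × Int)) : Decidable (Pre_process_letters modulus current_magic_number letters) := by unfold Pre_process_letters; infer_instance
def pvWitness_process_letters : Int × Int × (List (Int × Int)) := (5, 3, [(1, 2), (3, 4)])

def Spec_process_letters (modulus : Int) (current_magic_number : Int) (letters : List (Int × Int)) (out : List (List Int)) : Prop := out = process_letters_alt modulus current_magic_number letters
instance (modulus : Int) (current_magic_number : Int) (letters : List (Int × Int)) (out : List (List Int)) : Decidable (Spec_process_letters modulus current_magic_number letters out) := by unfold Spec_process_letters; infer_instance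

-- ===== CLAIM (what is proved, stated in full; the proofs are below) =====
def Claim_equal_process_letters : Prop := ∀ (modulus : Int) (current_magic_number : Int) (letters : List (Int × Int)), Dom_process_letters modulus current_magic_number letters → Pre_process_letters modulus current_magic_number letters → Spec_process_letters modulus current_magic_number letters (process_letters modulus current_magic_number letters)

-- ===== LEMMAS AND PROOFS =====

-- reference recursion: what both programs compute.
def pvGo (m c : Int) : List (Int × Int) → List (List Int)
  | [] => []
  | ab :: t =>
      [PySem.Int.mod (ab.1 * c) m, PySem.Int.mod (ab.2 * c) m]
        :: pvGo m (PySem.Int.mod (ab.2 * c) m) t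

theorem pvA_fold (m c : Int) (ls : List (Int × Int)) (acc : List (List Int)) :
    (ls.foldl
      (fun (st : Int × List (List Int)) ab =>
        let s := PySem.Int.mod (ab.1 * st.1) m
        let n := PySem.Int.mod (ab.2 * st.1) m
        (n, st.2 ++ [[s, n]]))
      (c, acc)).2 = acc ++ pvGo m c ls := by
  induction ls generalizing c acc with
  | nil => simp [pvGo]
  | cons h t ih => simp [pvGo, ih, List.append_assoc]

-- pass-1 tables of B, as recursions.
def pvPrevs (m c : Int) : List (Int × Int) → List Int
  | [] => []
  | ab :: t => c :: pvPrevs m (PySem.Int.mod (ab.2 * c) m) t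

def pvMagics (m c : Int) : List (Int × Int) → List Int
  | [] => []
  | ab :: t => PySem.Int.mod (ab.2 * c) m :: pvMagics m (PySem.Int.mod (ab.2 * c) m) t

theorem pvB_fold (m c : Int) (ls : List (Int × Int)) (ps ms : List Int) :
    (ls.foldl
      (fun (st : Int × List Int × List Int) ab =>
        let magic := PySem.Int.mod (ab.2 * st.1) m
        (magic, st.2.1 ++ [st.1], st.2.2 ++ [magic]))
      (c, ps, ms)).2 = (ps ++ pvPrevs m c ls, ms ++ pvMagics m c ls) := by
  induction ls generalizing c ps ms with
  | nil => simp [pvPrevs, pvMagics]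
  | cons h t ih => simp [pvPrevs, pvMagics, ih, List.append_assoc]

theorem pvB_zip (m c : Int) (ls : List (Int × Int)) :
    (ls.zip ((pvPrevs m c ls).zip (pvMagics m c ls))).map
      (fun x => [PySem.Int.mod (x.1.1 * x.2.1) m, x.2.2]) = pvGo m c ls := by
  induction ls generalizing c with
  | nil => simp [pvPrevs, pvMagics, pvGo]
  | cons h t ih => simp [pvPrevs, pvMagics, pvGo, ih]

-- ===== VERDICT (by name: the statement is the Claim_ definition above) =====
theorem process_letters_spec : Claim_equal_process_letters := by
  intro m c ls _ _
  unfold Spec_process_letters process_letters process_letters_alt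
  show _ = (ls.zip ((((ls.foldl
      (fun (st : Int × List Int × List Int) ab =>
        let magic := PySem.Int.mod (ab.2 * st.1) m
        (magic, st.2.1 ++ [st.1], st.2.2 ++ [magic]))
      (c, [], [])).2).1).zip (((ls.foldl
      (fun (st : Int × List Int × List Int) ab =>
        let magic := PySem.Int.mod (ab.2 * st.1) m
        (magic, st.2.1 ++ [st.1], st.2.2 ++ [magic]))
      (c, [], [])).2).2))).map
      (fun x => [PySem.Int.mod (x.1.1 * x.2.1) m, x.2.2])
  rw [pvA_fold, pvB_fold]
  simpa using (pvB_zip m c ls).symm
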